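-- pv_equiv track=rewrite | github.com/henryj57/egineering_project | rough_in_plan.py | _calculate_cable_callouts
-- ===== SOURCE A (Python) =====
-- from typing import Dict, List, Tuple, Optional
-- from collections import defaultdict
--
-- def _calculate_cable_callouts(room_systems: Dict[str, int],
--                                room_devices: Dict[str, int] = None) -> Dict[str, Dict[str, int]]:
--     """
--     Calculate cable requirements per destination based on SPECIFIC DEVICES.
--
--     Returns: {destination: {cable_type: count}}
--
--     Cable Rules (Industry Standard):
--     - TV/Display: CAT6 (2) per display → AV Rack
--     - Speaker: SPK (1) per speaker → AV Rack
--     - Subwoofer: SPK (1) per sub → AV Rack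
--     - LCR Bar: SPK (1) per bar → AV Rack
--     - Keypad: CTRL (1) per keypad → Lighting Control
--     - Camera: CAT6 (1) per camera → Network Rack
--     - WiFi AP: CAT6 (1) per AP → Network Rack
--     - HVAC Sensor: CAT6 (1) per sensor → AV Rack
--     """
--     cables = {
--         'To AV Rack': defaultdict(int),
--         'To Network Rack': defaultdict(int),
--         'Lighting': defaultdict(int),
--     }
--
--     # Use device-level data if available (more accurate)
--     if room_devices:
--         for device_type, count in room_devices.items():
--             if device_type == 'tv':
--                 # TV/Display: CAT6 (2) per display
--                 cables['To AV Rack']['CAT6'] += count * 2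
--
--             elif device_type in ('speaker', 'lcr_bar'):
--                 # Speakers: SPK (1) per speaker
--                 cables['To AV Rack']['SPK'] += count
--
--             elif device_type == 'subwoofer':
--                 # Subwoofer: SPK (1) per sub
--                 cables['To AV Rack']['SPK'] += count
--
--             elif device_type in ('keypad', 'keypad_wireless'):
--                 # Keypads: CTRL (1) per keypad
--                 cables['Lighting']['CTRL'] += count
--
--             elif device_type in ('camera', 'intercom'):
--                 # Cameras: CAT6 (1) per camera
--                 cables['To Network Rack']['CAT6'] += count
--
--             elif device_type == 'wap':
--                 # WiFi APs: CAT6 (1) per AP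
--                 cables['To Network Rack']['CAT6'] += count
--
--             elif device_type == 'thermostat':
--                 # HVAC sensors: CAT6 (1) per sensor
--                 cables['To AV Rack']['CAT6'] += count
--     else:
--         # Fall back to system-level calculation
--         for system, count in room_systems.items():
--             if system == 'Video':
--                 cables['To AV Rack']['CAT6'] += count * 2
--             elif system == 'Audio':
--                 cables['To AV Rack']['SPK'] += count
--             elif system == 'Lighting Control':
--                 cables['Lighting']['CTRL'] += count
--             elif system == 'CCTV':
--                 cables['To Network Rack']['CAT6'] += count
--             elif system == 'Network & WiFi':
--                 cables['To Network Rack']['CAT6'] += count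
--             elif system == 'Automation & Control':
--                 cables['To AV Rack']['CAT6'] += count
--             elif system == 'HVAC':
--                 cables['To AV Rack']['CAT6'] += count
--
--     # Remove empty destinations
--     return {dest: dict(types) for dest, types in cables.items() if types}
-- ===== SOURCE B (Python) =====
-- from typing import Dict, Optional
--
-- # key -> (destination, cable_type, multiplier)
-- _DEVICE_MAP = {
--     'tv':              ('To AV Rack', 'CAT6', 2),
--     'speaker':         ('To AV Rack', 'SPK', 1),
--     'lcr_bar':         ('To AV Rack', 'SPK', 1),
--     'subwoofer':       ('To AV Rack', 'SPK', 1),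
--     'keypad':          ('Lighting', 'CTRL', 1),
--     'keypad_wireless': ('Lighting', 'CTRL', 1),
--     'camera':          ('To Network Rack', 'CAT6', 1),
--     'intercom':        ('To Network Rack', 'CAT6', 1),
--     'wap':             ('To Network Rack', 'CAT6', 1),
--     'thermostat':      ('To AV Rack', 'CAT6', 1),
-- }
--
-- _SYSTEM_MAP = {
--     'Video':                ('To AV Rack', 'CAT6', 2),
--     'Audio':                ('To AV Rack', 'SPK', 1),
--     'Lighting Control':     ('Lighting', 'CTRL', 1),
--     'CCTV':                 ('To Network Rack', 'CAT6', 1),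
--     'Network & WiFi':       ('To Network Rack', 'CAT6', 1),
--     'Automation & Control': ('To AV Rack', 'CAT6', 1),
--     'HVAC':                 ('To AV Rack', 'CAT6', 1),
-- }
--
--
-- def _calculate_cable_callouts(room_systems: Dict[str, int],
--                               room_devices: Dict[str, int] = None) -> Dict[str, Dict[str, int]]:
--     """Table-driven version: flatten tallies into (destination, cable, count) events,
--     then aggregate per fixed destination."""
--     if room_devices:
--         events = [(_DEVICE_MAP[k][0], _DEVICE_MAP[k][1], v * _DEVICE_MAP[k][2])
--                   for k, v in room_devices.items() if k in _DEVICE_MAP]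
--     else:
--         events = [(_SYSTEM_MAP[k][0], _SYSTEM_MAP[k][1], v * _SYSTEM_MAP[k][2])
--                   for k, v in room_systems.items() if k in _SYSTEM_MAP]
--     out = {}
--     for dest in ('To AV Rack', 'To Network Rack', 'Lighting'):
--         inner = {}
--         for d, c, v in events:
--             if d == dest:
--                 inner[c] = inner.get(c, 0) + v
--         if inner:
--             out[dest] = inner
--     return out
-- ===== Notes on version B (the rewrite author's own statement) =====
-- stated objective: idiomatic
-- what changed: Replaces A's two if/elif cascades with module-level lookup tables that flatten the tallies into (destination, cable, count) events, then aggregates the events per fixed destination instead of updating three defaultdicts inside the cascade.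
import Mathlib
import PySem

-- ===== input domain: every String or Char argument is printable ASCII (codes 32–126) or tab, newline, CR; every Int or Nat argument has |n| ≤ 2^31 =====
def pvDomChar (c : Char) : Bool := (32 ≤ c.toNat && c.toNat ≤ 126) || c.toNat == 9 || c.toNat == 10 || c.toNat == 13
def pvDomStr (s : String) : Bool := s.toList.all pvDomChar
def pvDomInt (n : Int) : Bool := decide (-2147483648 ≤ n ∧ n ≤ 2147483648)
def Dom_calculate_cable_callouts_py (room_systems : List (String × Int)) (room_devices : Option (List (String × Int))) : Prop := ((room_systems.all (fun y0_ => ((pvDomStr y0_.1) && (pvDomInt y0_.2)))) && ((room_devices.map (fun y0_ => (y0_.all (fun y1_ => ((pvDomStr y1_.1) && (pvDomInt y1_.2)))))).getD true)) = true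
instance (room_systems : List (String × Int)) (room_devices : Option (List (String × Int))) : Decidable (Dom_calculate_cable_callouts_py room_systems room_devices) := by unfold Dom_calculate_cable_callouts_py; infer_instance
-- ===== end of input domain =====

-- B replaces A's two if/elif cascades with module-level lookup tables, flattening the tallies into
-- (destination, cable, count) events and aggregating them per destination (objective: idiomatic; not faster).

-- ===== PORT A =====
-- the three defaultdicts of A's 'cables' (fixed literal outer keys), in order: To AV Rack, To Network Rack, Lighting
def pvStepDevA (s : PySem.Dict String Int × PySem.Dict String Int × PySem.Dict String Int)
    (kv : String × Int) : PySem.Dict String Int × PySem.Dict String Int × PySem.Dict String Int :=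
  let av := s.1; let net := s.2.1; let light := s.2.2
  if kv.1 = "tv" then (av.insert "CAT6" (av.getD "CAT6" 0 + kv.2 * 2), net, light)
  else if kv.1 = "speaker" ∨ kv.1 = "lcr_bar" then (av.insert "SPK" (av.getD "SPK" 0 + kv.2), net, light)
  else if kv.1 = "subwoofer" then (av.insert "SPK" (av.getD "SPK" 0 + kv.2), net, light)
  else if kv.1 = "keypad" ∨ kv.1 = "keypad_wireless" then (av, net, light.insert "CTRL" (light.getD "CTRL" 0 + kv.2))
  else if kv.1 = "camera" ∨ kv.1 = "intercom" then (av, net.insert "CAT6" (net.getD "CAT6" 0 + kv.2), light)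
  else if kv.1 = "wap" then (av, net.insert "CAT6" (net.getD "CAT6" 0 + kv.2), light)
  else if kv.1 = "thermostat" then (av.insert "CAT6" (av.getD "CAT6" 0 + kv.2), net, light)
  else s

def pvStepSysA (s : PySem.Dict String Int × PySem.Dict String Int × PySem.Dict String Int)
    (kv : String × Int) : PySem.Dict String Int × PySem.Dict String Int × PySem.Dict String Int :=
  let av := s.1; let net := s.2.1; let light := s.2.2
  if kv.1 = "Video" then (av.insert "CAT6" (av.getD "CAT6" 0 + kv.2 * 2), net, light)
  else if kv.1 = "Audio" then (av.insert "SPK" (av.getD "SPK" 0 + kv.2), net, light)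
  else if kv.1 = "Lighting Control" then (av, net, light.insert "CTRL" (light.getD "CTRL" 0 + kv.2))
  else if kv.1 = "CCTV" then (av, net.insert "CAT6" (net.getD "CAT6" 0 + kv.2), light)
  else if kv.1 = "Network & WiFi" then (av, net.insert "CAT6" (net.getD "CAT6" 0 + kv.2), light)
  else if kv.1 = "Automation & Control" then (av.insert "CAT6" (av.getD "CAT6" 0 + kv.2), net, light)
  else if kv.1 = "HVAC" then (av.insert "CAT6" (av.getD "CAT6" 0 + kv.2), net, light)
  else s

-- the final comprehension: keep the three destinations in order, drop empty ones
def pvFinishA (st : PySem.Dict String Int × PySem.Dict String Int × PySem.Dict String Int) : List (String × List (String × Int)) :=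
  ([("To AV Rack", st.1.items), ("To Network Rack", st.2.1.items), ("Lighting", st.2.2.items)]).filter
    (fun p => !p.2.isEmpty)

def calculate_cable_callouts_py (room_systems : List (String × Int)) (room_devices : Option (List (String × Int))) : List (String × List (String × Int)) :=
  -- dict parameters: the association lists denote Python dicts (PySem.Dict.ofList); 'if room_devices:' is dict truthiness
  match room_devices with
  | some (p :: rest) => pvFinishA (((PySem.Dict.ofList (p :: rest)).items).foldl pvStepDevA (.empty, .empty, .empty))
  | _ => pvFinishA (((PySem.Dict.ofList room_systems).items).foldl pvStepSysA (.empty, .empty, .empty))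

-- ===== PORT B =====
def pvDeviceMap : List (String × String × String × Int) :=
  [("tv", "To AV Rack", "CAT6", 2), ("speaker", "To AV Rack", "SPK", 1), ("lcr_bar", "To AV Rack", "SPK", 1),
   ("subwoofer", "To AV Rack", "SPK", 1), ("keypad", "Lighting", "CTRL", 1), ("keypad_wireless", "Lighting", "CTRL", 1),
   ("camera", "To Network Rack", "CAT6", 1), ("intercom", "To Network Rack", "CAT6", 1),
   ("wap", "To Network Rack", "CAT6", 1), ("thermostat", "To AV Rack", "CAT6", 1)]

def pvSystemMap : List (String × String × String × Int) :=
  [("Video", "To AV Rack", "CAT6", 2), ("Audio", "To AV Rack", "SPK", 1), ("Lighting Control", "Lighting", "CTRL", 1),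
   ("CCTV", "To Network Rack", "CAT6", 1), ("Network & WiFi", "To Network Rack", "CAT6", 1),
   ("Automation & Control", "To AV Rack", "CAT6", 1), ("HVAC", "To AV Rack", "CAT6", 1)]

-- one tally → one (destination, cable_type, v * multiplier) event, none if the key is not in the table
def pvEvent (table : List (String × String × String × Int)) (kv : String × Int) : Option (String × String × Int) :=
  (table.lookup kv.1).map (fun t => (t.1, t.2.1, kv.2 * t.2.2))

def pvAggStep (dest : String) (d : PySem.Dict String Int) (e : String × String × Int) : PySem.Dict String Int :=
  if e.1 = dest then d.insert e.2.1 (d.getD e.2.1 0 + e.2.2) else d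

def pvAgg (events : List (String × String × Int)) (dest : String) : PySem.Dict String Int :=
  events.foldl (pvAggStep dest) .empty

-- per-destination aggregation of the flat event list, dropping empty destinations
def pvCollect (events : List (String × String × Int)) : List (String × List (String × Int)) :=
  (["To AV Rack", "To Network Rack", "Lighting"]).filterMap (fun dest =>
    let inner := pvAgg events dest
    if inner.items.isEmpty then none else some (dest, inner.items))

def calculate_cable_callouts_py_alt (room_systems : List (String × Int)) (room_devices : Option (List (String × Int))) : List (String × List (String × Int)) :=
  match room_devices with
  | none => pvCollect (((PySem.Dict.ofList room_systems).items).filterMap (pvEvent pvSystemMap))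
  | some l =>
    if l.isEmpty then pvCollect (((PySem.Dict.ofList room_systems).items).filterMap (pvEvent pvSystemMap))
    else pvCollect (((PySem.Dict.ofList l).items).filterMap (pvEvent pvDeviceMap))

-- ===== PRECONDITION & SPEC =====
def Spec_calculate_cable_callouts_py (room_systems : List (String × Int)) (room_devices : Option (List (String × Int))) (out : List (String × List (String × Int))) : Prop := out = calculate_cable_callouts_py_alt room_systems room_devices
instance (room_systems : List (String × Int)) (room_devices : Option (List (String × Int))) (out : List (String × List (String × Int))) : Decidable (Spec_calculate_cable_callouts_py room_systems room_devices out) := by unfold Spec_calculate_cable_callouts_py; infer_instance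

-- ===== CLAIM (what is proved, stated in full; the proofs are below) =====
def Claim_equal_calculate_cable_callouts_py : Prop := ∀ (room_systems : List (String × Int)) (room_devices : Option (List (String × Int))), Dom_calculate_cable_callouts_py room_systems room_devices → Spec_calculate_cable_callouts_py room_systems room_devices (calculate_cable_callouts_py room_systems room_devices)

-- ===== LEMMAS AND PROOFS =====

theorem loopDev_eq (items : List (String × Int))
    (av net light : PySem.Dict String Int) :
    items.foldl pvStepDevA (av, net, light) =
      ((items.filterMap (pvEvent pvDeviceMap)).foldl (pvAggStep "To AV Rack") av,
       (items.filterMap (pvEvent pvDeviceMap)).foldl (pvAggStep "To Network Rack") net,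
       (items.filterMap (pvEvent pvDeviceMap)).foldl (pvAggStep "Lighting") light) := by
  induction items generalizing av net light with
  | nil => rfl
  | cons kv rest ih =>
    obtain ⟨k, c⟩ := kv
    by_cases h1 : k = "tv"
    · simp [h1, pvStepDevA, pvEvent, pvDeviceMap, List.lookup, pvAggStep, ih]
    · by_cases h2 : k = "speaker"
      · simp [h2, pvStepDevA, pvEvent, pvDeviceMap, List.lookup, pvAggStep, ih]
      · by_cases h3 : k = "lcr_bar"
        · simp [h3, pvStepDevA, pvEvent, pvDeviceMap, List.lookup, pvAggStep, ih]
        · by_cases h4 : k = "subwoofer"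
          · simp [h4, pvStepDevA, pvEvent, pvDeviceMap, List.lookup, pvAggStep, ih]
          · by_cases h5 : k = "keypad"
            · simp [h5, pvStepDevA, pvEvent, pvDeviceMap, List.lookup, pvAggStep, ih]
            · by_cases h6 : k = "keypad_wireless"
              · simp [h6, pvStepDevA, pvEvent, pvDeviceMap, List.lookup, pvAggStep, ih]
              · by_cases h7 : k = "camera"
                · simp [h7, pvStepDevA, pvEvent, pvDeviceMap, List.lookup, pvAggStep, ih]
                · by_cases h8 : k = "intercom"
                  · simp [h8, pvStepDevA, pvEvent, pvDeviceMap, List.lookup, pvAggStep, ih]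
                  · by_cases h9 : k = "wap"
                    · simp [h9, pvStepDevA, pvEvent, pvDeviceMap, List.lookup, pvAggStep, ih]
                    · by_cases h10 : k = "thermostat"
                      · simp [h10, pvStepDevA, pvEvent, pvDeviceMap, List.lookup, pvAggStep, ih]
                      · have b1 : (k == "tv") = false := by simp [h1]
                        have b2 : (k == "speaker") = false := by simp [h2]
                        have b3 : (k == "lcr_bar") = false := by simp [h3]
                        have b4 : (k == "subwoofer") = false := by simp [h4]
                        have b5 : (k == "keypad") = false := by simp [h5]
                        have b6 : (k == "keypad_wireless") = false := by simp [h6]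
                        have b7 : (k == "camera") = false := by simp [h7]
                        have b8 : (k == "intercom") = false := by simp [h8]
                        have b9 : (k == "wap") = false := by simp [h9]
                        have b10 : (k == "thermostat") = false := by simp [h10]
                        simp [pvStepDevA, pvEvent, pvDeviceMap, List.lookup, h1, h2, h3, h4, h5, h6, h7, h8, h9, h10, b1, b2, b3, b4, b5, b6, b7, b8, b9, b10, ih]

theorem loopSys_eq (items : List (String × Int))
    (av net light : PySem.Dict String Int) :
    items.foldl pvStepSysA (av, net, light) =
      ((items.filterMap (pvEvent pvSystemMap)).foldl (pvAggStep "To AV Rack") av,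
       (items.filterMap (pvEvent pvSystemMap)).foldl (pvAggStep "To Network Rack") net,
       (items.filterMap (pvEvent pvSystemMap)).foldl (pvAggStep "Lighting") light) := by
  induction items generalizing av net light with
  | nil => rfl
  | cons kv rest ih =>
    obtain ⟨k, c⟩ := kv
    by_cases h1 : k = "Video"
    · simp [h1, pvStepSysA, pvEvent, pvSystemMap, List.lookup, pvAggStep, ih]
    · by_cases h2 : k = "Audio"
      · simp [h2, pvStepSysA, pvEvent, pvSystemMap, List.lookup, pvAggStep, ih]
      · by_cases h3 : k = "Lighting Control"
        · simp [h3, pvStepSysA, pvEvent, pvSystemMap, List.lookup, pvAggStep, ih]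
        · by_cases h4 : k = "CCTV"
          · simp [h4, pvStepSysA, pvEvent, pvSystemMap, List.lookup, pvAggStep, ih]
          · by_cases h5 : k = "Network & WiFi"
            · simp [h5, pvStepSysA, pvEvent, pvSystemMap, List.lookup, pvAggStep, ih]
            · by_cases h6 : k = "Automation & Control"
              · simp [h6, pvStepSysA, pvEvent, pvSystemMap, List.lookup, pvAggStep, ih]
              · by_cases h7 : k = "HVAC"
                · simp [h7, pvStepSysA, pvEvent, pvSystemMap, List.lookup, pvAggStep, ih]
                · have b1 : (k == "Video") = false := by simp [h1]
                  have b2 : (k == "Audio") = false := by simp [h2]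
                  have b3 : (k == "Lighting Control") = false := by simp [h3]
                  have b4 : (k == "CCTV") = false := by simp [h4]
                  have b5 : (k == "Network & WiFi") = false := by simp [h5]
                  have b6 : (k == "Automation & Control") = false := by simp [h6]
                  have b7 : (k == "HVAC") = false := by simp [h7]
                  simp [pvStepSysA, pvEvent, pvSystemMap, List.lookup, h1, h2, h3, h4, h5, h6, h7, b1, b2, b3, b4, b5, b6, b7, ih]

theorem assemble_eq (events : List (String × String × Int)) :
    pvFinishA (events.foldl (pvAggStep "To AV Rack") .empty,
               events.foldl (pvAggStep "To Network Rack") .empty,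
               events.foldl (pvAggStep "Lighting") .empty) =
    pvCollect events := by
  by_cases h1 : (pvAgg events "To AV Rack").items.isEmpty <;>
  by_cases h2 : (pvAgg events "To Network Rack").items.isEmpty <;>
  by_cases h3 : (pvAgg events "Lighting").items.isEmpty <;>
  simp_all [pvFinishA, pvCollect, pvAgg, List.filter, List.filterMap] <;>
  repeat (first | rfl | (split <;> simp_all))

-- ===== VERDICT (by name: the statement is the Claim_ definition above) =====
theorem calculate_cable_callouts_py_spec : Claim_equal_calculate_cable_callouts_py := by
  intro room_systems room_devices _
  show calculate_cable_callouts_py room_systems room_devices = calculate_cable_callouts_py_alt room_systems room_devices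
  match room_devices with
  | some (p :: rest) =>
    show pvFinishA _ = calculate_cable_callouts_py_alt _ (some (p :: rest))
    rw [show calculate_cable_callouts_py_alt room_systems (some (p :: rest)) =
        pvCollect (((PySem.Dict.ofList (p :: rest)).items).filterMap (pvEvent pvDeviceMap)) from rfl]
    rw [loopDev_eq]
    exact assemble_eq _
  | some [] =>
    show pvFinishA _ = calculate_cable_callouts_py_alt _ (some [])
    rw [show calculate_cable_callouts_py_alt room_systems (some []) =
        pvCollect (((PySem.Dict.ofList room_systems).items).filterMap (pvEvent pvSystemMap)) from rfl]
    rw [loopSys_eq]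
    exact assemble_eq _
  | none =>
    show pvFinishA _ = calculate_cable_callouts_py_alt _ none
    rw [show calculate_cable_callouts_py_alt room_systems none =
        pvCollect (((PySem.Dict.ofList room_systems).items).filterMap (pvEvent pvSystemMap)) from rfl]
    rw [loopSys_eq]
    exact assemble_eq _
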